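-- pv_equiv track=rewrite | github.com/revarbat/BelfryCAD | src/BelfryCAD/gui/grid_info.py | _superscript_numbers
-- ===== SOURCE A (Python) =====
-- def _superscript_numbers(value: int) -> str:
--     """Get the superscript for the given number string."""
--     superscripts = {
--         "0": "⁰", "1": "¹", "2": "²", "3": "³", "4": "⁴",
--         "5": "⁵", "6": "⁶", "7": "⁷", "8": "⁸", "9": "⁹",
--     }
--     valstr = f"{value}"
--     for digit, superscript in superscripts.items():
--         valstr = valstr.replace(digit, superscript)
--     return valstr
-- ===== SOURCE B (Python) =====
-- _SUP = "⁰¹²³⁴⁵⁶⁷⁸⁹"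
--
-- def _superscript_numbers(value: int) -> str:
--     """Get the superscript for the given number string."""
--     if value < 0:
--         return "-" + _superscript_numbers(-value)
--     q, r = divmod(value, 10)
--     return (_superscript_numbers(q) + _SUP[r]) if q else _SUP[r]
-- ===== Notes on version B (the rewrite author's own statement) =====
-- stated objective: alternative
-- what changed: Replaces A's ten whole-string str.replace passes over f"{value}" (one per dict entry) with a direct divmod recursion on the integer that emits each superscript digit from a lookup string, never building intermediate strings or a dict.
import Mathlib
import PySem

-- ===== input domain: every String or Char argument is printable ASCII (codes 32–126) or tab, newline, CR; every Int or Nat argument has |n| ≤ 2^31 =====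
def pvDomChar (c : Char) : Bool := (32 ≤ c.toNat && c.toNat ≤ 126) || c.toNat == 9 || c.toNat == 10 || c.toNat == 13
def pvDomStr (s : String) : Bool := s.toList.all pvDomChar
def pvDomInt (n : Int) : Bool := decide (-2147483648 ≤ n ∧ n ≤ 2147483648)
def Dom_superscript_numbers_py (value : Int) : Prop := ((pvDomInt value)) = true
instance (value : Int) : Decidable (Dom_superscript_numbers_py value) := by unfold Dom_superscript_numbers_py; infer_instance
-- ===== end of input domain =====

-- B replaces A's ten whole-string str.replace passes by a direct divmod recursion on the
-- integer (no intermediate strings, no dict); same return value for every int.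

-- ===== PORT A =====
-- A: build the superscripts dict, valstr = f"{value}", then one str.replace pass per dict item.
def superscript_numbers_py (value : Int) : String :=
  let superscripts : PySem.Dict String String := PySem.Dict.ofList
    [("0", "⁰"), ("1", "¹"), ("2", "²"), ("3", "³"), ("4", "⁴"),
     ("5", "⁵"), ("6", "⁶"), ("7", "⁷"), ("8", "⁸"), ("9", "⁹")]
  let valstr := PySem.Int.toStr value
  superscripts.items.foldl (fun v p => PySem.Str.replace v p.1 p.2) valstr

-- ===== PORT B =====
-- B: _SUP = "⁰¹²³⁴⁵⁶⁷⁸⁹"; recursion on the integer via divmod; _SUP[r] is total since 0 ≤ r < 10.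
def supTable : List Char := ['⁰', '¹', '²', '³', '⁴', '⁵', '⁶', '⁷', '⁸', '⁹']

def supNatAlt (n : Nat) : List Char :=
  let q := n / 10
  let r := n % 10
  if q = 0 then [PySem.List.pyGetD supTable (r : Int) '⁰']
  else supNatAlt q ++ [PySem.List.pyGetD supTable (r : Int) '⁰']
termination_by n
decreasing_by exact Nat.div_lt_self (Nat.pos_of_ne_zero (by omega)) (by omega)

def superscript_numbers_py_alt (value : Int) : String :=
  if value < 0 then String.ofList ('-' :: supNatAlt (-value).toNat)
  else String.ofList (supNatAlt value.toNat)

-- ===== PRECONDITION & SPEC =====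
def Spec_superscript_numbers_py (value : Int) (out : String) : Prop := out = superscript_numbers_py_alt value
instance (value : Int) (out : String) : Decidable (Spec_superscript_numbers_py value out) := by unfold Spec_superscript_numbers_py; infer_instance

-- ===== CLAIM (what is proved, stated in full; the proofs are below) =====
def Claim_equal_superscript_numbers_py : Prop := ∀ (value : Int), Dom_superscript_numbers_py value → Spec_superscript_numbers_py value (superscript_numbers_py value)

-- ===== LEMMAS AND PROOFS =====

-- one str.replace with a single-char pattern and single-char replacement is a pointwise map
theorem replace_go_single (d s : Char) (l acc : List Char) (fuel : Nat) (h : l.length ≤ fuel) :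
    PySem.Chars.replace.go [d] [s] fuel l acc
      = acc.reverse ++ l.map (fun c => if c = d then s else c) := by
  induction l generalizing fuel acc with
  | nil => cases fuel <;> simp [PySem.Chars.replace.go]
  | cons c t ih =>
    cases fuel with
    | zero => simp at h
    | succ fuel =>
      simp only [PySem.Chars.replace.go, List.isPrefixOf, List.length_cons] at *
      by_cases hc : c = d
      · rw [if_pos (by simp [hc])]
        simp only [List.length_nil, Nat.zero_add, List.drop_succ_cons, List.drop_zero,
          List.reverse_singleton, List.singleton_append]
        rw [ih (s :: acc) fuel (by omega)]
        simp [hc]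
      · rw [if_neg (by simp [Ne.symm hc])]
        rw [ih (c :: acc) fuel (by omega)]
        simp [hc]

theorem replace_single (d s : Char) (cs : List Char) :
    PySem.Chars.replace cs [d] [s] = cs.map (fun c => if c = d then s else c) := by
  simpa [PySem.Chars.replace] using replace_go_single d s cs [] cs.length le_rfl

-- the pointwise effect of A's ten passes
def subA (c : Char) : Char :=
  if c = '0' then '⁰' else if c = '1' then '¹' else if c = '2' then '²' else
  if c = '3' then '³' else if c = '4' then '⁴' else if c = '5' then '⁵' else
  if c = '6' then '⁶' else if c = '7' then '⁷' else if c = '8' then '⁸' else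
  if c = '9' then '⁹' else c

set_option maxHeartbeats 1000000 in
theorem portA_eq_map (value : Int) :
    superscript_numbers_py value = String.ofList ((PySem.Int.toChars value).map subA) := by
  have key : ∀ (v o n : String) (d s : Char), o.toList = [d] → n.toList = [s] →
      PySem.Str.replace v o n
        = String.ofList (v.toList.map (fun c => if c = d then s else c)) := by
    intro v o n d s ho hn
    simp only [PySem.Str.replace, ho, hn, replace_single]
  have items : (PySem.Dict.ofList
      [("0", "⁰"), ("1", "¹"), ("2", "²"), ("3", "³"), ("4", "⁴"),
       ("5", "⁵"), ("6", "⁶"), ("7", "⁷"), ("8", "⁸"), ("9", "⁹")]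
        : PySem.Dict String String).items
      = [("0", "⁰"), ("1", "¹"), ("2", "²"), ("3", "³"), ("4", "⁴"),
         ("5", "⁵"), ("6", "⁶"), ("7", "⁷"), ("8", "⁸"), ("9", "⁹")] := by decide
  show (PySem.Dict.ofList _ : PySem.Dict String String).items.foldl _ _ = _
  rw [items]
  simp only [List.foldl]
  rw [key _ _ _ '9' '⁹' rfl rfl, key _ _ _ '8' '⁸' rfl rfl, key _ _ _ '7' '⁷' rfl rfl,
    key _ _ _ '6' '⁶' rfl rfl, key _ _ _ '5' '⁵' rfl rfl, key _ _ _ '4' '⁴' rfl rfl,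
    key _ _ _ '3' '³' rfl rfl, key _ _ _ '2' '²' rfl rfl, key _ _ _ '1' '¹' rfl rfl,
    key _ _ _ '0' '⁰' rfl rfl]
  simp only [String.toList_ofList, List.map_map, PySem.Int.toList_toStr]
  refine congrArg String.ofList ?_
  apply List.map_congr_left
  intro c _
  by_cases h0 : c = '0'; · subst h0; decide
  by_cases h1 : c = '1'; · subst h1; decide
  by_cases h2 : c = '2'; · subst h2; decide
  by_cases h3 : c = '3'; · subst h3; decide
  by_cases h4 : c = '4'; · subst h4; decide
  by_cases h5 : c = '5'; · subst h5; decide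
  by_cases h6 : c = '6'; · subst h6; decide
  by_cases h7 : c = '7'; · subst h7; decide
  by_cases h8 : c = '8'; · subst h8; decide
  by_cases h9 : c = '9'; · subst h9; decide
  simp [Function.comp_apply, subA, h0, h1, h2, h3, h4, h5, h6, h7, h8, h9]

-- plain digit representation with the same recursion shape as Nat.toDigits' core loop
def repNat (n : Nat) : List Char :=
  let q := n / 10
  if q = 0 then [Nat.digitChar (n % 10)] else repNat q ++ [Nat.digitChar (n % 10)]
termination_by n
decreasing_by exact Nat.div_lt_self (Nat.pos_of_ne_zero (by omega)) (by omega)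

theorem toDigitsCore_eq_repNat (fuel n : Nat) (ds : List Char) (h : n < fuel) :
    Nat.toDigitsCore 10 fuel n ds = repNat n ++ ds := by
  induction n using Nat.strong_induction_on generalizing fuel ds with
  | _ n ih =>
    cases fuel with
    | zero => omega
    | succ fuel =>
      rw [Nat.toDigitsCore, repNat]
      by_cases hq : n / 10 = 0
      · simp [hq]
      · have hlt : n / 10 < n := Nat.div_lt_self (Nat.pos_of_ne_zero (by omega)) (by omega)
        simp only [hq, if_false]
        rw [ih (n / 10) hlt fuel ((n % 10).digitChar :: ds) (by omega)]
        simp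

theorem subA_digitChar (n : Nat) :
    subA ((n % 10).digitChar) = PySem.List.pyGetD supTable ((n : Int) % 10) '⁰' := by
  have h : (n : Int) % 10 = ((n % 10 : Nat) : Int) := by omega
  rw [h]
  have h2 : n % 10 < 10 := Nat.mod_lt _ (by omega)
  generalize hg : n % 10 = r at *
  interval_cases r <;> decide

theorem map_subA_repNat (n : Nat) : (repNat n).map subA = supNatAlt n := by
  induction n using Nat.strong_induction_on with
  | _ n ih =>
    rw [repNat, supNatAlt]
    by_cases hq : n / 10 = 0
    · simp [hq, subA_digitChar n]
    · have hlt : n / 10 < n := Nat.div_lt_self (Nat.pos_of_ne_zero (by omega)) (by omega)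
      simp [hq, ih _ hlt, subA_digitChar n]

-- ===== VERDICT (by name: the statement is the Claim_ definition above) =====
theorem superscript_numbers_py_spec : Claim_equal_superscript_numbers_py := by
  intro value _
  show superscript_numbers_py value = superscript_numbers_py_alt value
  rw [portA_eq_map, superscript_numbers_py_alt, PySem.Int.toChars]
  by_cases h : value < 0
  · simp only [h, if_true, List.map_cons]
    have h1 : subA '-' = '-' := by decide
    rw [h1]
    have h2 : (-value).toNat = value.natAbs := by omega
    rw [h2, Nat.toDigits, toDigitsCore_eq_repNat _ _ _ (by omega), List.append_nil,
      map_subA_repNat]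
  · simp only [h, if_false]
    rw [Nat.toDigits, toDigitsCore_eq_repNat _ _ _ (by omega), List.append_nil,
      map_subA_repNat]
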